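-- pv_equiv track=rewrite | github.com/megabyte0/python | slack_to_db/read_keys.py | split_insert
-- ===== SOURCE A (Python) =====
-- import itertools
--
-- def split_insert(data):
--     assert isinstance(data, list)
--     assert all(
--         isinstance(i, dict)
--         for i in data
--     )
--     key_fn = lambda keys_:tuple(sorted(keys_))
--     data = sorted(data, key=key_fn)
--     return {
--         k: list(g)
--         for k, g in itertools.groupby(data, key_fn)
--     }
-- ===== SOURCE B (Python) =====
-- def split_insert(data):
--     assert isinstance(data, list)
--     assert all(
--         isinstance(i, dict)
--         for i in data
--     )
--     groups = {}
--     for d in data: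
--         groups.setdefault(tuple(sorted(d)), []).append(d)
--     return {k: groups[k] for k in sorted(groups)}
-- ===== Notes on version B (the rewrite author's own statement) =====
-- stated objective: alternative
-- what changed: Instead of sorting the whole list of dicts by their sorted-key tuple and running itertools.groupby over it, B groups the dicts into a hash map keyed by the sorted-key tuple in one pass and then sorts only the distinct keys.
import Mathlib
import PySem

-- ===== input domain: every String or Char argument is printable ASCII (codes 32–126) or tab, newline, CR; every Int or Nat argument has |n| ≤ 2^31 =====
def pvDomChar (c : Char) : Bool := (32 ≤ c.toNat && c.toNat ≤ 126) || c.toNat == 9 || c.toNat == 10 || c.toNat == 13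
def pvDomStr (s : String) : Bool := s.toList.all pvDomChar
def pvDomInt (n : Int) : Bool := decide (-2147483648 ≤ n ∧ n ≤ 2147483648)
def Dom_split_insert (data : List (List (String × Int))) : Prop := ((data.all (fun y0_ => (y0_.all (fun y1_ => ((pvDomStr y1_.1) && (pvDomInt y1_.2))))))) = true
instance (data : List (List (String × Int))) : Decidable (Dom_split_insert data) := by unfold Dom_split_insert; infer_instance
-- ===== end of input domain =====

-- B groups the rows into a dict keyed by their sorted-key tuple in one pass and sorts only
-- the distinct keys, instead of A's sort-the-whole-list-then-groupby; same association list.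


-- ===== PORT A =====
-- key_fn = lambda keys_: tuple(sorted(keys_)) — iterating a dict yields its keys
def pyKeyFn (d : List (String × Int)) : List String :=
  PySem.List.sorted (d.map Prod.fst) (fun x => x) false

-- itertools.groupby(l, key): consecutive runs of equal key (each run = a span of the tail)
def pyGroupby {α κ : Type} [BEq κ] (key : α → κ) : List α → List (κ × List α)
  | [] => []
  | x :: xs =>
    (key x, x :: xs.takeWhile (fun y => key y == key x)) ::
      pyGroupby key (xs.dropWhile (fun y => key y == key x))
termination_by l => l.length
decreasing_by simpa using Nat.lt_succ_of_le (List.length_dropWhile_le _ _)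

def split_insert (data : List (List (String × Int))) : List (List String × List (List (String × Int))) :=
  -- data = sorted(data, key=key_fn)
  let data' := PySem.List.sorted data pyKeyFn false
  -- {k: list(g) for k, g in groupby(data, key_fn)}: groupby of a key-sorted list yields
  -- pairwise-distinct keys, so the built dict IS this association list in this order
  pyGroupby pyKeyFn data'

-- ===== PORT B =====
def split_insert_alt (data : List (List (String × Int))) : List (List String × List (List (String × Int))) :=
  -- groups.setdefault(tuple(sorted(d)), []).append(d)  ≡  groups[k] = groups.get(k, []) + [d]
  let groups := data.foldl (fun g d => g.modify (pyKeyFn d) [] (fun v => v ++ [d])) PySem.Dict.empty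
  -- {k: groups[k] for k in sorted(groups)}: the keys are distinct, so the dict IS this list
  (PySem.List.sorted groups.keys (fun k => k) false).map (fun k => (k, groups.getD k []))

-- ===== PRECONDITION & SPEC =====
def Spec_split_insert (data : List (List (String × Int))) (out : List (List String × List (List (String × Int)))) : Prop := out = split_insert_alt data
instance (data : List (List (String × Int))) (out : List (List String × List (List (String × Int)))) : Decidable (Spec_split_insert data out) := by unfold Spec_split_insert; infer_instance

-- ===== CLAIM (what is proved, stated in full; the proofs are below) =====
def Claim_equal_split_insert : Prop := ∀ (data : List (List (String × Int))), Dom_split_insert data → Spec_split_insert data (split_insert data)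

-- ===== LEMMAS AND PROOFS =====

theorem insertBy_cons {α : Type} (before : α → α → Bool) (x y : α) (ys : List α) :
    PySem.List.insertBy before x (y :: ys)
      = if before x y then x :: y :: ys else y :: PySem.List.insertBy before x ys := rfl

-- stability of the insertion step: inserting into a key-sorted list appends to its key-class
theorem filter_insertBy {α κ : Type} [BEq κ] [LawfulBEq κ] [LinearOrder κ]
    (key : α → κ) (k : κ) (x : α) (ys : List α)
    (h : ys.Pairwise (fun a b => key a ≤ key b)) :
    (PySem.List.insertBy (fun a b => decide (key a < key b)) x ys).filter (fun a => key a == k)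
      = ys.filter (fun a => key a == k) ++ if key x == k then [x] else [] := by
  induction ys with
  | nil =>
    show List.filter _ [x] = _
    rw [List.filter_cons]
    split <;> simp
  | cons y ys ih =>
    rw [List.pairwise_cons] at h
    rw [insertBy_cons]
    by_cases hlt : key x < key y
    · simp only [hlt, decide_true, if_true]
      by_cases hk : key x = k
      · have hnil : (y :: ys).filter (fun a => key a == k) = [] := by
          rw [List.filter_eq_nil_iff]
          intro a ha
          have hxa : key x < key a := by
            rcases List.mem_cons.mp ha with rfl | ha'
            · exact hlt
            · exact lt_of_lt_of_le hlt (h.1 a ha')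
          simp only [beq_iff_eq]
          exact fun hc => absurd (hc ▸ hk ▸ rfl : key a = key x) (ne_of_gt hxa)
        rw [List.filter_cons, hnil]
        simp [hk]
      · rw [List.filter_cons]
        simp [beq_iff_eq, hk]
    · simp only [hlt, decide_false, Bool.false_eq_true, if_false]
      rw [List.filter_cons, List.filter_cons, ih h.2]
      split <;> simp

-- stability of sorted: sorting does not change the list of elements of any one key-class
theorem filter_sorted {α κ : Type} [BEq κ] [LawfulBEq κ] [LinearOrder κ]
    (key : α → κ) (k : κ) (xs : List α) :
    (PySem.List.sorted xs key false).filter (fun a => key a == k)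
      = xs.filter (fun a => key a == k) := by
  induction xs using List.reverseRecOn with
  | nil => rw [(PySem.List.sorted_eq_nil_iff [] key false).mpr rfl]
  | append_singleton xs x ih =>
    rw [PySem.List.sorted_eq_foldl_insertBy, List.foldl_append, List.foldl_cons, List.foldl_nil,
      ← PySem.List.sorted_eq_foldl_insertBy,
      filter_insertBy key k x _ (PySem.List.sorted_pairwise xs key), ih,
      List.filter_append, List.filter_cons]
    split <;> simp

-- groupby keys are exactly the keys occurring in the list (any list)
theorem mem_keys_groupby {α κ : Type} [BEq κ] [LawfulBEq κ] (key : α → κ) (l : List α) (k : κ) :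
    k ∈ (List.map Prod.fst (pyGroupby key l)) ↔ k ∈ l.map key := by
  induction l using pyGroupby.induct key with
  | case1 => simp [pyGroupby]
  | case2 x xs ih =>
    rw [pyGroupby]
    simp only [List.map_cons, List.mem_cons, ih]
    constructor
    · rintro (rfl | hk)
      · exact Or.inl rfl
      · rcases List.mem_map.mp hk with ⟨b, hb, rfl⟩
        exact Or.inr (List.mem_map_of_mem ((List.dropWhile_suffix _).subset hb))
    · rintro (rfl | hk)
      · exact Or.inl rfl
      · rcases List.mem_map.mp hk with ⟨b, hb, rfl⟩
        rw [← List.takeWhile_append_dropWhile (p := fun y => key y == key x) (l := xs)] at hb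
        rcases List.mem_append.mp hb with h1 | h2
        · exact Or.inl (by simpa using List.mem_takeWhile_imp h1)
        · exact Or.inr (List.mem_map_of_mem h2)

-- on a key-sorted list, every element after the dropped run has strictly larger key
theorem key_lt_of_mem_dropWhile {α κ : Type} [BEq κ] [LawfulBEq κ] [LinearOrder κ]
    (key : α → κ) (x : α) (xs : List α)
    (h : (x :: xs).Pairwise (fun a b => key a ≤ key b)) :
    ∀ b ∈ xs.dropWhile (fun y => key y == key x), key x < key b := by
  rw [List.pairwise_cons] at h
  cases e : xs.dropWhile (fun y => key y == key x) with
  | nil => intro b hb; simp at hb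
  | cons z rest =>
    have hzfalse : (key z == key x) = false := by
      have hne : xs.dropWhile (fun y => key y == key x) ≠ [] := by
        rw [e]; exact List.cons_ne_nil z rest
      have := List.head_dropWhile_not (fun y => key y == key x) hne
      simpa [e] using this
    have hzmem : z ∈ xs := (List.dropWhile_suffix _).subset (e ▸ List.mem_cons_self)
    have hxz : key x < key z := by
      have hle := h.1 z hzmem
      have hne : key z ≠ key x := by simpa using hzfalse
      exact lt_of_le_of_ne hle (Ne.symm hne)
    have hpw : (z :: rest).Pairwise (fun a b => key a ≤ key b) := by
      have := h.2.sublist ((List.dropWhile_suffix (fun y => key y == key x) (l := xs)).sublist)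
      rwa [e] at this
    intro b hb
    rcases List.mem_cons.mp hb with rfl | hb'
    · exact hxz
    · exact lt_of_lt_of_le hxz ((List.pairwise_cons.mp hpw).1 b hb')

-- on a key-sorted list, each groupby group is the key-class filter of the whole list
theorem groupby_sorted {α κ : Type} [BEq κ] [LawfulBEq κ] [LinearOrder κ]
    (key : α → κ) (l : List α) (h : l.Pairwise (fun a b => key a ≤ key b)) :
    pyGroupby key l
      = ((pyGroupby key l).map Prod.fst).map (fun k => (k, l.filter (fun a => key a == k))) := by
  induction l using pyGroupby.induct key with
  | case1 => simp [pyGroupby]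
  | case2 x xs ih =>
    have hpw_r : (xs.dropWhile (fun y => key y == key x)).Pairwise (fun a b => key a ≤ key b) :=
      (List.pairwise_cons.mp h).2.sublist (List.dropWhile_suffix _).sublist
    have hlt := key_lt_of_mem_dropWhile key x xs h
    have hA : (x :: xs).filter (fun a => key a == key x)
        = x :: xs.takeWhile (fun y => key y == key x) := by
      rw [List.filter_cons_of_pos (by simp)]
      congr 1
      conv_lhs => rw [← List.takeWhile_append_dropWhile (p := fun y => key y == key x) (l := xs)]
      have h1 : (xs.takeWhile (fun y => key y == key x)).filter (fun a => key a == key x)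
          = xs.takeWhile (fun y => key y == key x) :=
        List.filter_eq_self.mpr (fun a ha => List.mem_takeWhile_imp (p := fun y => key y == key x) ha)
      have h2 : (xs.dropWhile (fun y => key y == key x)).filter (fun a => key a == key x) = [] := by
        rw [List.filter_eq_nil_iff]
        intro a ha
        simp only [beq_iff_eq]
        exact fun hc => ne_of_gt (hlt a ha) hc
      rw [List.filter_append, h1, h2, List.append_nil]
    have hfe : ∀ k ∈ (pyGroupby key (xs.dropWhile (fun y => key y == key x))).map Prod.fst,
        (xs.dropWhile (fun y => key y == key x)).filter (fun a => key a == k)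
          = (x :: xs).filter (fun a => key a == k) := by
      intro k hk
      rcases List.mem_map.mp ((mem_keys_groupby key _ k).mp hk) with ⟨b, hb, rfl⟩
      have hxk : key x < key b := hlt b hb
      rw [List.filter_cons_of_neg (by simp only [beq_iff_eq]; simpa using ne_of_lt hxk)]
      conv_rhs => rw [← List.takeWhile_append_dropWhile (p := fun y => key y == key x) (l := xs)]
      have hnil : (xs.takeWhile (fun y => key y == key x)).filter (fun a => key a == key b) = [] := by
        rw [List.filter_eq_nil_iff]
        intro a ha
        have hax : key a = key x := by simpa using List.mem_takeWhile_imp ha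
        simp only [beq_iff_eq, hax]
        exact ne_of_lt hxk
      rw [List.filter_append, hnil, List.nil_append]
    rw [pyGroupby]
    simp only [List.map_cons]
    congr 1
    · rw [hA]
    · calc pyGroupby key (xs.dropWhile (fun y => key y == key x))
          = ((pyGroupby key (xs.dropWhile (fun y => key y == key x))).map Prod.fst).map
              (fun k => (k, (xs.dropWhile (fun y => key y == key x)).filter (fun a => key a == k))) :=
            ih hpw_r
        _ = _ := List.map_congr_left (fun k hk => by rw [hfe k hk])

-- on a key-sorted list, groupby keys are strictly increasing
theorem keys_groupby_pairwise {α κ : Type} [BEq κ] [LawfulBEq κ] [LinearOrder κ]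
    (key : α → κ) (l : List α) (h : l.Pairwise (fun a b => key a ≤ key b)) :
    ((pyGroupby key l).map Prod.fst).Pairwise (· < ·) := by
  induction l using pyGroupby.induct key with
  | case1 => simp [pyGroupby]
  | case2 x xs ih =>
    have hpw_r : (xs.dropWhile (fun y => key y == key x)).Pairwise (fun a b => key a ≤ key b) :=
      (List.pairwise_cons.mp h).2.sublist (List.dropWhile_suffix _).sublist
    have hlt := key_lt_of_mem_dropWhile key x xs h
    rw [pyGroupby]
    simp only [List.map_cons, List.pairwise_cons]
    refine ⟨?_, ih hpw_r⟩
    intro k hk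
    rcases List.mem_map.mp ((mem_keys_groupby key _ k).mp hk) with ⟨b, hb, rfl⟩
    exact hlt b hb

-- B's dict lookup is the key-class filter of the input
theorem groups_getD (data : List (List (String × Int))) (k : List String) :
    (data.foldl (fun g d => g.modify (pyKeyFn d) [] (fun v => v ++ [d])) PySem.Dict.empty).getD k []
      = data.filter (fun d => pyKeyFn d == k) := by
  have h := PySem.Dict.getD_foldl_modify_append
    (data.map (fun d => (pyKeyFn d, d))) PySem.Dict.empty k
  rw [List.foldl_map] at h
  simp only [PySem.Dict.getD_empty, List.nil_append] at h
  rw [h, List.filter_map, List.map_map]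
  simp [Function.comp_def]

-- B's dict keys are the distinct keys of the input, in first-occurrence order
theorem groups_keys (data : List (List (String × Int))) :
    (data.foldl (fun g d => g.modify (pyKeyFn d) [] (fun v => v ++ [d])) PySem.Dict.empty).keys
      = PySem.Set.ofList (data.map pyKeyFn) := by
  have h := PySem.Dict.keys_foldl_modify_key data pyKeyFn [] (fun _ d v => v ++ [d]) PySem.Dict.empty
  simp only [PySem.Dict.keys_empty] at h
  rw [h]
  exact PySem.Set.update_nil_left _

-- the two LT/DecidableLT instance paths on List String coincide (cast between port and order lemmas)
theorem sorted_cast {β : Type} (xs : List β) (key : β → List String) (r : Bool) :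
    PySem.List.sorted xs key r
      = @PySem.List.sorted β (List String)
          (@LinearOrder.toPartialOrder (List String) _).toPreorder.toLT
          LinearOrder.toDecidableLT xs key r := by
  congr

-- sort-then-groupby equals hash-group-then-sort-the-distinct-keys
theorem groupby_eq_hashgroup {α κ : Type} [BEq κ] [LawfulBEq κ] [LinearOrder κ]
    (key : α → κ) (data : List α) :
    pyGroupby key (PySem.List.sorted data key false)
      = (PySem.List.sorted (PySem.Set.ofList (data.map key)) (fun k => k) false).map
          (fun k => (k, data.filter (fun a => key a == k))) := by
  have hpw := PySem.List.sorted_pairwise data key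
  have hkeys : PySem.List.sorted (PySem.Set.ofList (data.map key)) (fun k => k) false
      = (pyGroupby key (PySem.List.sorted data key false)).map Prod.fst := by
    apply PySem.List.sorted_eq_of_perm_of_pairwise_lt
    · rw [List.perm_ext_iff_of_nodup
        (List.Pairwise.imp (fun hab => ne_of_lt hab) (keys_groupby_pairwise key _ hpw))
        (PySem.Set.nodup_ofList _)]
      intro k
      rw [mem_keys_groupby, PySem.Set.mem_ofList]
      exact ((PySem.List.sorted_perm data key false).map key).mem_iff
    · exact keys_groupby_pairwise key _ hpw
  rw [hkeys]
  conv_lhs => rw [groupby_sorted key _ hpw]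
  simp only [filter_sorted]

-- ===== VERDICT (by name: the statement is the Claim_ definition above) =====
theorem split_insert_spec : Claim_equal_split_insert := by
  intro data _
  show pyGroupby pyKeyFn (PySem.List.sorted data pyKeyFn false)
      = (PySem.List.sorted
          ((data.foldl (fun g d => g.modify (pyKeyFn d) [] (fun v => v ++ [d])) PySem.Dict.empty).keys)
          (fun k => k) false).map
          (fun k => (k, (data.foldl (fun g d => g.modify (pyKeyFn d) [] (fun v => v ++ [d])) PySem.Dict.empty).getD k []))
  rw [groups_keys]
  simp only [groups_getD]
  rw [sorted_cast, sorted_cast]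
  exact groupby_eq_hashgroup pyKeyFn data
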